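-- pv_equiv track=rewrite | github.com/Tdelaselle/Psalms_in_NT | scripts/TMtoLXX_converter.py | Ps_LXX
-- ===== SOURCE A (Python) =====
-- def Ps_LXX(Ps_TM):
--     """
--     This function takes a list of Psalms in the TM (Traditional Masoretic) numbering
--     and returns the corresponding Psalms in the LXX (Septuagint) numbering.
--     """
--     # Mapping of TM to LXX Psalm numbers
--
--     # Build a dictionary: keys are TM Psalm numbers, values are LXX Psalm numbers
--     tm_to_lxx = {'1': '1', '2': '2', '3': '3', '4': '4', '5': '5',
--                  '6': '6', '7': '7', '8': '8', '9': '9A', '10': '9B'}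
--
--     for i in range(11, 114):
--         tm_to_lxx[str(i)] = str(i - 1)
--
--     tm_to_lxx['114'] = '113A'
--     tm_to_lxx['115'] = '113B'
--     tm_to_lxx['116A'] = '114'
--     tm_to_lxx['116B'] = '115'
--
--     for i in range(117, 147):
--         tm_to_lxx[str(i)] = str(i - 1)
--
--     tm_to_lxx['147A'] = '146'
--     tm_to_lxx['147B'] = '147'
--     tm_to_lxx['148'] = '148'
--     tm_to_lxx['149'] = '149'
--     tm_to_lxx['150'] = '150'
--     tm_to_lxx['151'] = '151'
--
--     return [tm_to_lxx.get(psalm, psalm) for psalm in Ps_TM]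
-- ===== SOURCE B (Python) =====
-- def Ps_LXX(Ps_TM):
--     """
--     This function takes a list of Psalms in the TM (Traditional Masoretic) numbering
--     and returns the corresponding Psalms in the LXX (Septuagint) numbering.
--     """
--     # Direct rule instead of a 153-entry dictionary: a small table of the
--     # explicit exceptions, and an arithmetic shift for the two plain ranges.
--     exceptions = {'9': '9A', '10': '9B', '114': '113A', '115': '113B',
--                   '116A': '114', '116B': '115', '147A': '146', '147B': '147'}
--
--     def conv(s):
--         if s in exceptions:
--             return exceptions[s]
--         if s.isdigit():
--             n = int(s)
--             if s == str(n) and (11 <= n <= 113 or 117 <= n <= 146):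
--                 return str(n - 1)
--         return s
--
--     return [conv(s) for s in Ps_TM]
-- ===== Notes on version B (the rewrite author's own statement) =====
-- stated objective: simpler
-- what changed: Replaces the construction of a 153-entry TM-to-LXX dictionary with a direct per-psalm rule: an 8-entry exception table plus an arithmetic shift (n-1) for canonical numeric strings in 11..113 and 117..146, identity otherwise.
import Mathlib
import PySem

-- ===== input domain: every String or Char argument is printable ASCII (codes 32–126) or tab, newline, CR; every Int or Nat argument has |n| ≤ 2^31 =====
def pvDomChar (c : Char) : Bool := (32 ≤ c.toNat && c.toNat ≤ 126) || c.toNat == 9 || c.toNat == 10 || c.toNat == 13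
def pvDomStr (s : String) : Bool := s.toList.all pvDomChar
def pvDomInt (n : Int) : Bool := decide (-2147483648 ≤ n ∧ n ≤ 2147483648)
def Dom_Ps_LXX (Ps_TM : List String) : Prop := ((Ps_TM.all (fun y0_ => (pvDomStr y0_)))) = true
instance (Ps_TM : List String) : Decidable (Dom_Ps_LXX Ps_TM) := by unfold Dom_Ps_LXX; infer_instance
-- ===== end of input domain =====

-- B replaces A's 153-entry dictionary by an 8-entry exception table plus an arithmetic rule (simpler).

-- ===== PORT A =====
-- A's dictionary, built exactly as the Python builds it (literal, two range loops, literal tail entries).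
def tmToLxx : PySem.Dict String String :=
  let d0 := PySem.Dict.ofList [("1","1"),("2","2"),("3","3"),("4","4"),("5","5"),
              ("6","6"),("7","7"),("8","8"),("9","9A"),("10","9B")]
  let d1 := (PySem.List.pyRange 11 114 1).foldl
              (fun d i => d.insert (PySem.Int.toStr i) (PySem.Int.toStr (i - 1))) d0
  let d2 := (((d1.insert "114" "113A").insert "115" "113B").insert "116A" "114").insert "116B" "115"
  let d3 := (PySem.List.pyRange 117 147 1).foldl
              (fun d i => d.insert (PySem.Int.toStr i) (PySem.Int.toStr (i - 1))) d2
  (((((d3.insert "147A" "146").insert "147B" "147").insert "148" "148").insert "149" "149").insert "150" "150").insert "151" "151"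

def Ps_LXX (Ps_TM : List String) : List String :=
  Ps_TM.map (fun psalm => tmToLxx.getD psalm psalm)

-- ===== PORT B =====
def pvExcB : PySem.Dict String String :=
  PySem.Dict.ofList [("9","9A"),("10","9B"),("114","113A"),("115","113B"),
                     ("116A","114"),("116B","115"),("147A","146"),("147B","147")]

def pvConvB (s : String) : String :=
  match pvExcB.get? s with
  | some v => v
  | none =>
    if PySem.Str.strIsdigit s then
      match PySem.Int.ofStr? s with
      | some n =>
        if s = PySem.Int.toStr n ∧ ((11 ≤ n ∧ n ≤ 113) ∨ (117 ≤ n ∧ n ≤ 146)) then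
          PySem.Int.toStr (n - 1)
        else s
      | none => s
    else s

def Ps_LXX_alt (Ps_TM : List String) : List String := Ps_TM.map pvConvB

-- ===== PRECONDITION & SPEC =====
def Spec_Ps_LXX (Ps_TM : List String) (out : List String) : Prop := out = Ps_LXX_alt Ps_TM
instance (Ps_TM : List String) (out : List String) : Decidable (Spec_Ps_LXX Ps_TM out) := by unfold Spec_Ps_LXX; infer_instance

-- ===== CLAIM (what is proved, stated in full; the proofs are below) =====
def Claim_equal_Ps_LXX : Prop := ∀ (Ps_TM : List String), Dom_Ps_LXX Ps_TM → Spec_Ps_LXX Ps_TM (Ps_LXX Ps_TM)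

-- ===== LEMMAS AND PROOFS =====

-- A's dictionary as a literal association list (one kernel evaluation of A's construction).
set_option maxRecDepth 10000 in
theorem tmToLxx_eq : tmToLxx = PySem.Dict.mk [("1","1"),("2","2"),("3","3"),("4","4"),("5","5"),("6","6"),("7","7"),("8","8"),("9","9A"),("10","9B"),("11","10"),("12","11"),("13","12"),("14","13"),("15","14"),("16","15"),("17","16"),("18","17"),("19","18"),("20","19"),("21","20"),("22","21"),("23","22"),("24","23"),("25","24"),("26","25"),("27","26"),("28","27"),("29","28"),("30","29"),("31","30"),("32","31"),("33","32"),("34","33"),("35","34"),("36","35"),("37","36"),("38","37"),("39","38"),("40","39"),("41","40"),("42","41"),("43","42"),("44","43"),("45","44"),("46","45"),("47","46"),("48","47"),("49","48"),("50","49"),("51","50"),("52","51"),("53","52"),("54","53"),("55","54"),("56","55"),("57","56"),("58","57"),("59","58"),("60","59"),("61","60"),("62","61"),("63","62"),("64","63"),("65","64"),("66","65"),("67","66"),("68","67"),("69","68"),("70","69"),("71","70"),("72","71"),("73","72"),("74","73"),("75","74"),("76","75"),("77","76"),("78","77"),("79","78"),("80","79"),("81","80"),("82","81"),("83","82"),(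"84","83"),("85","84"),("86","85"),("87","86"),("88","87"),("89","88"),("90","89"),("91","90"),("92","91"),("93","92"),("94","93"),("95","94"),("96","95"),("97","96"),("98","97"),("99","98"),("100","99"),("101","100"),("102","101"),("103","102"),("104","103"),("105","104"),("106","105"),("107","106"),("108","107"),("109","108"),("110","109"),("111","110"),("112","111"),("113","112"),("114","113A"),("115","113B"),("116A","114"),("116B","115"),("117","116"),("118","117"),("119","118"),("120","119"),("121","120"),("122","121"),("123","122"),("124","123"),("125","124"),("126","125"),("127","126"),("128","127"),("129","128"),("130","129"),("131","130"),("132","131"),("133","132"),("134","133"),("135","134"),("136","135"),("137","136"),("138","137"),("139","138"),("140","139"),("141","140"),("142","141"),("143","142"),("144","143"),("145","144"),("146","145"),("147A","146"),("147B","147"),("148","148"),("149","149"),("150","150"),("151","151")] := by decide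

-- every numeric key of the two range loops looks up to its decrement
set_option maxRecDepth 10000 in
theorem lookup_range : ∀ m : Nat, m < 147 →
    ((11 ≤ m ∧ m ≤ 113) ∨ (117 ≤ m ∧ m ≤ 146)) →
    tmToLxx.get? (PySem.Int.toStr (m : Int)) = some (PySem.Int.toStr ((m : Int) - 1)) := by
  rw [tmToLxx_eq]; decide

set_option maxRecDepth 10000 in
theorem conv_eq (s : String) : tmToLxx.getD s s = pvConvB s := by
  cases hv : tmToLxx.get? s with
  | some v =>
    rw [PySem.Dict.getD_of_get?_eq_some _ s hv]
    have hm := PySem.Dict.mem_items_of_get?_eq_some _ hv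
    rw [tmToLxx_eq] at hm
    simp only [List.mem_cons, Prod.mk.injEq, List.not_mem_nil, or_false] at hm
    rcases hm with (⟨rfl,rfl⟩|⟨rfl,rfl⟩|⟨rfl,rfl⟩|⟨rfl,rfl⟩|⟨rfl,rfl⟩|⟨rfl,rfl⟩|⟨rfl,rfl⟩|⟨rfl,rfl⟩|⟨rfl,rfl⟩|⟨rfl,rfl⟩|⟨rfl,rfl⟩|⟨rfl,rfl⟩|⟨rfl,rfl⟩|⟨rfl,rfl⟩|⟨rfl,rfl⟩|⟨rfl,rfl⟩|⟨rfl,rfl⟩|⟨rfl,rfl⟩|⟨rfl,rfl⟩|⟨rfl,rfl⟩|⟨rfl,rfl⟩|⟨rfl,rfl⟩|⟨rfl,rfl⟩|⟨rfl,rfl⟩|⟨rfl,rfl⟩|⟨rfl,rfl⟩|⟨rfl,rfl⟩|⟨rfl,rfl⟩|⟨rfl,rfl⟩|⟨rfl,rfl⟩|⟨rfl,rfl⟩|⟨rfl,rfl⟩|⟨rfl,rfl⟩|⟨rfl,rfl⟩|⟨rfl,rfl⟩|⟨rfl,rfl⟩|⟨rfl,rfl⟩|⟨rfl,rfl⟩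|⟨rfl,rfl⟩|⟨rfl,rfl⟩|⟨rfl,rfl⟩|⟨rfl,rfl⟩|⟨rfl,rfl⟩|⟨rfl,rfl⟩|⟨rfl,rfl⟩|⟨rfl,rfl⟩|⟨rfl,rfl⟩|⟨rfl,rfl⟩|⟨rfl,rfl⟩|⟨rfl,rfl⟩|⟨rfl,rfl⟩|⟨rfl,rfl⟩|⟨rfl,rfl⟩|⟨rfl,rfl⟩|⟨rfl,rfl⟩|⟨rfl,rfl⟩|⟨rfl,rfl⟩|⟨rfl,rfl⟩|⟨rfl,rfl⟩|⟨rfl,rfl⟩|⟨rfl,rfl⟩|⟨rfl,rfl⟩|⟨rfl,rfl⟩|⟨rfl,rfl⟩|⟨rfl,rfl⟩|⟨rfl,rfl⟩|⟨rfl,rfl⟩|⟨rfl,rfl⟩|⟨rfl,rfl⟩|⟨rfl,rfl⟩|⟨rfl,rfl⟩|⟨rfl,rfl⟩|⟨rfl,rfl⟩|⟨rfl,rfl⟩|⟨rfl,rfl⟩|⟨rfl,rfl⟩|⟨rfl,rfl⟩|⟨rfl,rfl⟩|⟨rfl,rfl⟩|⟨rfl,rfl⟩|⟨rfl,rfl⟩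|⟨rfl,rfl⟩|⟨rfl,rfl⟩|⟨rfl,rfl⟩|⟨rfl,rfl⟩|⟨rfl,rfl⟩|⟨rfl,rfl⟩|⟨rfl,rfl⟩|⟨rfl,rfl⟩|⟨rfl,rfl⟩|⟨rfl,rfl⟩|⟨rfl,rfl⟩|⟨rfl,rfl⟩|⟨rfl,rfl⟩|⟨rfl,rfl⟩|⟨rfl,rfl⟩|⟨rfl,rfl⟩|⟨rfl,rfl⟩|⟨rfl,rfl⟩|⟨rfl,rfl⟩|⟨rfl,rfl⟩|⟨rfl,rfl⟩|⟨rfl,rfl⟩|⟨rfl,rfl⟩|⟨rfl,rfl⟩|⟨rfl,rfl⟩|⟨rfl,rfl⟩|⟨rfl,rfl⟩|⟨rfl,rfl⟩|⟨rfl,rfl⟩|⟨rfl,rfl⟩|⟨rfl,rfl⟩|⟨rfl,rfl⟩|⟨rfl,rfl⟩|⟨rfl,rfl⟩|⟨rfl,rfl⟩|⟨rfl,rfl⟩|⟨rfl,rfl⟩|⟨rfl,rfl⟩|⟨rfl,rfl⟩|⟨rfl,rfl⟩|⟨rfl,rfl⟩|⟨rfl,rfl⟩|⟨rfl,rfl⟩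|⟨rfl,rfl⟩|⟨rfl,rfl⟩|⟨rfl,rfl⟩|⟨rfl,rfl⟩|⟨rfl,rfl⟩|⟨rfl,rfl⟩|⟨rfl,rfl⟩|⟨rfl,rfl⟩|⟨rfl,rfl⟩|⟨rfl,rfl⟩|⟨rfl,rfl⟩|⟨rfl,rfl⟩|⟨rfl,rfl⟩|⟨rfl,rfl⟩|⟨rfl,rfl⟩|⟨rfl,rfl⟩|⟨rfl,rfl⟩|⟨rfl,rfl⟩|⟨rfl,rfl⟩|⟨rfl,rfl⟩|⟨rfl,rfl⟩|⟨rfl,rfl⟩|⟨rfl,rfl⟩|⟨rfl,rfl⟩|⟨rfl,rfl⟩|⟨rfl,rfl⟩|⟨rfl,rfl⟩|⟨rfl,rfl⟩|⟨rfl,rfl⟩)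
    all_goals rfl
  | none =>
    rw [PySem.Dict.getD_of_get?_eq_none _ s hv]
    unfold pvConvB
    cases he : pvExcB.get? s with
    | some w =>
      have hexc : pvExcB = PySem.Dict.mk [("9","9A"),("10","9B"),("114","113A"),("115","113B"),
          ("116A","114"),("116B","115"),("147A","146"),("147B","147")] := by decide
      have hm := PySem.Dict.mem_items_of_get?_eq_some _ he
      rw [hexc] at hm
      simp only [List.mem_cons, Prod.mk.injEq, List.not_mem_nil, or_false] at hm
      rcases hm with (⟨rfl,rfl⟩|⟨rfl,rfl⟩|⟨rfl,rfl⟩|⟨rfl,rfl⟩|⟨rfl,rfl⟩|⟨rfl,rfl⟩|⟨rfl,rfl⟩|⟨rfl,rfl⟩)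
      all_goals exact absurd hv (by rw [tmToLxx_eq]; decide)
    | none =>
      by_cases hd : PySem.Str.strIsdigit s
      · simp only [hd, if_true]
        cases ho : PySem.Int.ofStr? s with
        | none => rfl
        | some n =>
          by_cases hc : s = PySem.Int.toStr n ∧ ((11 ≤ n ∧ n ≤ 113) ∨ (117 ≤ n ∧ n ≤ 146))
          · obtain ⟨heq, hr⟩ := hc
            exfalso
            have hn0 : 0 ≤ n := by omega
            have hm : n.toNat < 147 := by omega
            have := lookup_range n.toNat hm (by omega)
            rw [Int.toNat_of_nonneg hn0] at this
            rw [← heq, hv] at this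
            simp at this
          · simp [hc]
      · rw [if_neg hd]


theorem Ps_LXX_spec : Claim_equal_Ps_LXX := by
  intro l _
  unfold Spec_Ps_LXX Ps_LXX Ps_LXX_alt
  exact List.map_congr_left (fun s _ => conv_eq s)
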